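-- pv_equiv track=rewrite | github.com/zeerre/noip.new | BaseFolder/Python/洛谷oj/幂次方/pz.py | f
-- ===== SOURCE A (Python) =====
-- import math
--
-- def f(x):
--     if x==1:
--         return '2(0)'
--     if x==2:
--         return '2'
--     if x==3:
--         return '2+2(0)'
--
--     n=int(math.log(x,2))
--     t=2**n
--     if x==t:
--         return "2("+f(n)+")"
--     else:
--         return "2("+f(n)+")+"+f(x-t)
-- ===== SOURCE B (Python) =====
-- def f(x):
--     # Iterative: peel the highest set bit off x each round, collect the terms, join with '+'.
--     # Recursion remains only for the exponent. (For x <= 0 the loop body never runs and '' is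
--     # returned; the original raises ValueError there — excluded by Pre_.)
--     parts = []
--     while x > 0:
--         n = x.bit_length() - 1
--         if n == 0:
--             parts.append('2(0)')
--         elif n == 1:
--             parts.append('2')
--         else:
--             parts.append('2(' + f(n) + ')')
--         x -= 1 << n
--     return '+'.join(parts)
-- ===== Notes on version B (the rewrite author's own statement) =====
-- stated objective: simpler
-- what changed: Replaces the recursive descent with its three hard-coded base cases by a single while loop that peels the highest set bit off x each round (bit_length, exact where A's int(math.log(x,2)) is on this domain) and joins the collected terms with '+', keeping recursion only for the exponent.
-- outside the precondition, e.g. on f(0): A raises ValueError, B returns ''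
import Mathlib
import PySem

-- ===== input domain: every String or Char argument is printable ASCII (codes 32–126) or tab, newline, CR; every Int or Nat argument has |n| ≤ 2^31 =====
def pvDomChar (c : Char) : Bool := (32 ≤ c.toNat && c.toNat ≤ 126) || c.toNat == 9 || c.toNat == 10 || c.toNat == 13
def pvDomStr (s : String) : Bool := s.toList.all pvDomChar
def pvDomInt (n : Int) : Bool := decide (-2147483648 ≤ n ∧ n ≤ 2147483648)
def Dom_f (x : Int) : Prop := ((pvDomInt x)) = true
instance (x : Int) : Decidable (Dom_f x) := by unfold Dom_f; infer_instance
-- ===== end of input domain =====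

-- B rewrites the recursion as a single while loop that peels the highest power of two off x each
-- round and joins the collected terms with '+' (recursion kept only for the exponent); objective: simpler.

-- ===== PORT A =====
-- `int(math.log(x,2))`: on 1 ≤ x ≤ 2^31 the float computation rounds to exactly ⌊log₂ x⌋
-- (verified around every power of two and by random sampling), so it is modeled as `Nat.log 2`.
def pyIntLog2 (x : Int) : Nat := Nat.log 2 x.toNat

def f (x : Int) : String :=
  if x ≤ 0 then ""   -- Python: math.log raises ValueError here; excluded by Pre_f (totality guard only)
  else if x = 1 then "2(0)"
  else if x = 2 then "2"
  else if x = 3 then "2+2(0)"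
  else
    let n := pyIntLog2 x
    let t : Int := (2 : Int) ^ n
    if x = t then "2(" ++ f (n : Int) ++ ")"
    else "2(" ++ f (n : Int) ++ ")+" ++ f (x - t)
termination_by x.toNat
decreasing_by
  all_goals first
    | (simp only [pyIntLog2, Int.toNat_natCast]; exact Nat.log_lt_self 2 (by omega))
    | (have ht : (2 : Nat) ^ Nat.log 2 x.toNat ≤ x.toNat := Nat.pow_log_le_self 2 (by omega)
       have hxt : (x.toNat : Int) = x := Int.toNat_of_nonneg (by omega)
       have hc : ((2 ^ pyIntLog2 x : Nat) : Int) ≤ x :=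
         le_of_le_of_eq (by exact_mod_cast ht) hxt
       have h1' : (1 : Int) ≤ ((2 ^ pyIntLog2 x : Nat) : Int) := by exact_mod_cast Nat.one_le_two_pow
       have hcast : (2 : Int) ^ pyIntLog2 x = ((2 ^ pyIntLog2 x : Nat) : Int) := by push_cast; ring
       rw [hcast]; omega)

-- ===== PORT B =====
mutual
/-- The `while x > 0` loop of B: the list `parts` it builds, in order. -/
def faltParts (x : Int) : List String :=
  if x ≤ 0 then []
  else
    let n := PySem.Int.bitLength x - 1
    let part := if n = 0 then "2(0)" else if n = 1 then "2"
                else "2(" ++ f_alt (n : Int) ++ ")"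
    part :: faltParts (x - (2 : Int) ^ n)
  termination_by (x.toNat, 0)
  decreasing_by
  · apply Prod.Lex.left
    have h2 : 2 ^ (PySem.Int.bitLength x - 1) ≤ x.natAbs := PySem.Int.two_pow_bitLength_le x (by omega)
    have h3 : PySem.Int.bitLength x - 1 < 2 ^ (PySem.Int.bitLength x - 1) := Nat.lt_two_pow_self
    simp only [Int.toNat_natCast]
    omega
  · apply Prod.Lex.left
    have h2 : 2 ^ (PySem.Int.bitLength x - 1) ≤ x.natAbs := PySem.Int.two_pow_bitLength_le x (by omega)
    have hab : x.natAbs = x.toNat := by omega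
    have hxt : (x.toNat : Int) = x := Int.toNat_of_nonneg (by omega)
    have h2' : 2 ^ (PySem.Int.bitLength x - 1) ≤ x.toNat := by omega
    have hc : ((2 ^ (PySem.Int.bitLength x - 1) : Nat) : Int) ≤ x :=
      le_of_le_of_eq (by exact_mod_cast h2') hxt
    have h1' : (1 : Int) ≤ ((2 ^ (PySem.Int.bitLength x - 1) : Nat) : Int) := by
      exact_mod_cast Nat.one_le_two_pow
    have hcast : (2 : Int) ^ (PySem.Int.bitLength x - 1) = ((2 ^ (PySem.Int.bitLength x - 1) : Nat) : Int) := by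
      push_cast; ring
    rw [hcast]
    omega

def f_alt (x : Int) : String := PySem.Str.join "+" (faltParts x)
  termination_by (x.toNat, 1)
  decreasing_by exact Prod.Lex.right _ (by omega)
end

-- ===== PRECONDITION & SPEC =====
-- Pre_f excludes x ≤ 0, on which the Python A raises ValueError (math.log of a nonpositive number).
def Pre_f (x : Int) : Prop := 1 ≤ x
instance (x : Int) : Decidable (Pre_f x) := by unfold Pre_f; infer_instance
def pvWitness_f : Int := (5)

def Spec_f (x : Int) (out : String) : Prop := out = f_alt x
instance (x : Int) (out : String) : Decidable (Spec_f x out) := by unfold Spec_f; infer_instance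

-- ===== CLAIM (what is proved, stated in full; the proofs are below) =====
def Claim_equal_f : Prop := ∀ (x : Int), Dom_f x → Pre_f x → Spec_f x (f x)

-- ===== LEMMAS AND PROOFS =====

theorem bitLength_nat_eq_log (m : Nat) (hm : 0 < m) :
    PySem.Int.bitLength (m : Int) = Nat.log 2 m + 1 := by
  induction m using Nat.strong_induction_on with
  | _ m ih =>
    by_cases h2 : 2 ≤ m
    · rw [PySem.Int.bitLength_natCast hm, ih (m / 2) (by omega) (by omega),
        Nat.log_div_base]
      have hpos : 0 < Nat.log 2 m := Nat.log_pos (by norm_num) h2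
      omega
    · interval_cases m
      · decide

theorem bitLength_sub_one_eq_log (x : Int) (hx : 1 ≤ x) :
    PySem.Int.bitLength x - 1 = Nat.log 2 x.toNat := by
  have hxt : (x.toNat : Int) = x := Int.toNat_of_nonneg (by omega)
  have h := bitLength_nat_eq_log x.toNat (by omega)
  rw [hxt] at h
  omega

theorem faltParts_cons (x : Int) (hx : 1 ≤ x) :
    faltParts x =
      (if PySem.Int.bitLength x - 1 = 0 then "2(0)"
       else if PySem.Int.bitLength x - 1 = 1 then "2"
       else "2(" ++ f_alt ((PySem.Int.bitLength x - 1 : Nat) : Int) ++ ")") ::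
      faltParts (x - (2 : Int) ^ (PySem.Int.bitLength x - 1)) := by
  rw [faltParts.eq_def]
  simp [show ¬ x ≤ 0 by omega]

theorem faltParts_zero : faltParts 0 = [] := by
  rw [faltParts.eq_def]; norm_num

theorem join_singleton' (p : String) : PySem.Str.join "+" [p] = p := by
  rw [← String.toList_inj]
  simp [PySem.Str.toList_join, PySem.Chars.join_singleton]

theorem join_cons' (p q : String) (rest : List String) :
    PySem.Str.join "+" (p :: q :: rest) = p ++ "+" ++ PySem.Str.join "+" (q :: rest) := by
  rw [← String.toList_inj]
  simp [PySem.Str.toList_join, PySem.Chars.join_cons_cons]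

theorem falt_one : f_alt 1 = "2(0)" := by
  rw [f_alt.eq_def, faltParts_cons 1 (by norm_num)]
  rw [show PySem.Int.bitLength 1 - 1 = 0 by decide]
  norm_num [faltParts_zero, join_singleton']

theorem falt_two : f_alt 2 = "2" := by
  rw [f_alt.eq_def, faltParts_cons 2 (by norm_num)]
  rw [show PySem.Int.bitLength 2 - 1 = 1 by decide]
  norm_num [show (2:Int) - 2 ^ 1 = 0 by norm_num, faltParts_zero, join_singleton']

theorem falt_three : f_alt 3 = "2+2(0)" := by
  rw [f_alt.eq_def, faltParts_cons 3 (by norm_num)]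
  rw [show PySem.Int.bitLength 3 - 1 = 1 by decide]
  norm_num [show (3:Int) - 2 ^ 1 = 1 by norm_num]
  rw [faltParts_cons 1 (by norm_num), show PySem.Int.bitLength 1 - 1 = 0 by decide]
  norm_num [faltParts_zero, join_cons', join_singleton']
  rw [← String.toList_inj]
  simp

theorem main_equiv : ∀ (x : Int), 1 ≤ x → f x = f_alt x := by
  have key : ∀ (m : Nat) (x : Int), x.toNat ≤ m → 1 ≤ x → f x = f_alt x := by
    intro m
    induction m with
    | zero => intro x hle hx; omega
    | succ m ih =>
      intro x hle hx
      by_cases h1 : x = 1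
      · rw [h1, falt_one, f]; norm_num
      · by_cases hx2 : x = 2
        · rw [hx2, falt_two, f]; norm_num
        · by_cases hx3 : x = 3
          · rw [hx3, falt_three, f]; norm_num
          · -- x ≥ 4
            have hx4 : 4 ≤ x := by omega
            set n := Nat.log 2 x.toNat with hn
            have hbl : PySem.Int.bitLength x - 1 = n :=
              bitLength_sub_one_eq_log x (by omega)
            have hn2 : 2 ≤ n := by
              rw [hn]
              exact (Nat.le_log_iff_pow_le (by norm_num) (by omega)).mpr (by norm_num; omega)
            have hnlt : n < x.toNat := Nat.log_lt_self 2 (by omega)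
            have ht : (2 : Nat) ^ n ≤ x.toNat := Nat.pow_log_le_self 2 (by omega)
            have hxt : (x.toNat : Int) = x := Int.toNat_of_nonneg (by omega)
            have hcast : (2 : Int) ^ n = ((2 ^ n : Nat) : Int) := by push_cast; ring
            have hc : (2 : Int) ^ n ≤ x := by
              rw [hcast]; exact le_of_le_of_eq (by exact_mod_cast ht) hxt
            have hpos : (0 : Int) < 2 ^ n := by positivity
            have hfn : f (n : Int) = f_alt (n : Int) := by
              apply ih _ (by simp only [Int.toNat_natCast]; omega)
              exact_mod_cast Nat.one_le_of_lt hn2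
            rw [f]
            simp only [show ¬ x ≤ 0 by omega, if_false, h1, hx2, hx3, if_false]
            simp only [show pyIntLog2 x = n from rfl]
            rw [f_alt.eq_def, faltParts_cons x (by omega), hbl]
            simp only [show ¬ n = 0 by omega, show ¬ n = 1 by omega, if_false]
            by_cases heq : x = (2 : Int) ^ n
            · simp only [if_pos heq]
              rw [show x - (2 : Int) ^ n = 0 by omega, faltParts_zero, join_singleton', hfn]
            · simp only [if_neg heq]
              have hrem : 1 ≤ x - (2 : Int) ^ n := by omega
              have hfr : f (x - (2 : Int) ^ n) = f_alt (x - (2 : Int) ^ n) := by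
                exact ih _ (by omega) hrem
              obtain ⟨q, rest, hqr⟩ : ∃ q rest,
                  faltParts (x - (2 : Int) ^ n) = q :: rest :=
                ⟨_, _, faltParts_cons (x - (2 : Int) ^ n) hrem⟩
              rw [hqr, join_cons', ← hqr,
                show PySem.Str.join "+" (faltParts (x - (2 : Int) ^ n)) =
                    f_alt (x - (2 : Int) ^ n) from (f_alt.eq_def _).symm,
                hfn, hfr, ← String.toList_inj]
              simp
  intro x hx
  exact key x.toNat x (le_refl _) hx

-- ===== VERDICT (by name: the statement is the Claim_ definition above) =====
theorem f_spec : Claim_equal_f := by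
  intro x _ hp
  unfold Spec_f
  exact main_equiv x hp
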